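-- pv_equiv track=rewrite | github.com/utilizzato/workshop | leet/a_choose_b.py | generate_all_walks_dfs
-- ===== SOURCE A (Python) =====
-- def generate_all_walks_dfs(n_up, n_down):
--     ret = []
--     stack = [("", 0, 0)]
--     while stack:
--         path, cur_up, cur_down = stack.pop()
--         if cur_up < n_up:
--             stack.append((path + "U", cur_up + 1, cur_down))
--         if cur_down < n_down:
--             stack.append((path + "D", cur_up, cur_down + 1))
--         if cur_up == n_up and cur_down == n_down:
--             ret.append(path)
--     return ret
-- ===== SOURCE B (Python) =====
-- def generate_all_walks_dfs(n_up, n_down):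
--     # Dynamic programming over the remaining counts: walks(u, d) holds, in A's
--     # emission order, every walk using u U's and d D's; built row by row.
--     if n_up < 0 or n_down < 0:
--         return []
--     prev = []
--     for u in range(n_up + 1):
--         row = []
--         for d in range(n_down + 1):
--             if u == 0 and d == 0:
--                 walks = ['']
--             else:
--                 walks = []
--                 if d > 0:
--                     walks += ['D' + s for s in row[-1]]
--                 if u > 0:
--                     walks += ['U' + s for s in prev[d]]
--             row.append(walks)
--         prev = row
--     return prev[-1]
-- ===== Notes on version B (the rewrite author's own statement) =====
-- stated objective: alternative
-- what changed: Replaced A's explicit-stack DFS loop with an iterative dynamic program that builds, row by row over the (used-U, used-D) counts, the list of walks for each count pair in A's emission order (D-extension before U-extension).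
import Mathlib
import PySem

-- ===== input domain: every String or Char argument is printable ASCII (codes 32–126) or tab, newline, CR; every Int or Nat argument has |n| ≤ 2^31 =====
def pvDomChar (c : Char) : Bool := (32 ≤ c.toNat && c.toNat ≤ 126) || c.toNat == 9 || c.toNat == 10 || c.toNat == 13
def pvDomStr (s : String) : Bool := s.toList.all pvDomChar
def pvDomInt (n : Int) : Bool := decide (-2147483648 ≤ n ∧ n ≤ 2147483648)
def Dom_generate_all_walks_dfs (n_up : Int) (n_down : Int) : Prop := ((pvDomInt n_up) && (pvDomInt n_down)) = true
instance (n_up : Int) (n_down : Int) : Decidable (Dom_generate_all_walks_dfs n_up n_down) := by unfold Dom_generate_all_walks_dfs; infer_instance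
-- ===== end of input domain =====

-- B replaces A's explicit-stack DFS by an iterative dynamic program over the two counts, building each walk set
-- row by row from smaller counts; objective: alternative (recursion- and stack-free), same output, similar cost.
-- A's loop terminates in Python; the vestigial `fuel` counter only makes the same loop total in Lean (proved never to run out).

-- ===== PORT A =====
-- A's while-loop over (ret, stack); the Python stack top (list end, where append/pop act) is the list head here
def pvLoopA (n_up : Int) (n_down : Int) (fuel : Nat) (ret : List String)
    (stack : List (String × Int × Int)) : List String :=
  match fuel, stack with
  | _, [] => ret
  | 0, _ => ret      -- unreachable: generate_all_walks_dfs supplies fuel ≥ the loop's iteration count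
  | fuel + 1, (path, cur_up, cur_down) :: rest =>
    let s1 := if cur_up < n_up then (path ++ "U", cur_up + 1, cur_down) :: rest else rest
    let s2 := if cur_down < n_down then (path ++ "D", cur_up, cur_down + 1) :: s1 else s1
    let ret' := if cur_up == n_up && cur_down == n_down then ret ++ [path] else ret
    pvLoopA n_up n_down fuel ret' s2

def generate_all_walks_dfs (n_up : Int) (n_down : Int) : List String :=
  pvLoopA n_up n_down (3 ^ (n_up.toNat + n_down.toNat)) [] [("", 0, 0)]

-- ===== PORT B =====
-- B's inner loop: build row u (walks for each down-count d = 0..n_down at up-count u) from the previous row.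
-- Python's row[-1] and prev[d] are in range wherever evaluated; pyGetD's default [] is never taken.
def pvRowB (n_down : Int) (u : Int) (prev : List (List String)) : List (List String) :=
  (PySem.List.pyRange 0 (n_down + 1) 1).foldl
    (fun row d =>
      row ++ [if u == 0 && d == 0 then [""]
              else (if d > 0 then (PySem.List.pyGetD row (-1) []).map (fun s => "D" ++ s) else []) ++
                   (if u > 0 then (PySem.List.pyGetD prev d []).map (fun s => "U" ++ s) else [])]) []

def generate_all_walks_dfs_alt (n_up : Int) (n_down : Int) : List String :=
  if n_up < 0 || n_down < 0 then []
  else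
    PySem.List.pyGetD
      ((PySem.List.pyRange 0 (n_up + 1) 1).foldl (fun prev u => pvRowB n_down u prev) [])
      (-1) []

-- ===== PRECONDITION & SPEC =====
def Spec_generate_all_walks_dfs (n_up : Int) (n_down : Int) (out : List String) : Prop := out = generate_all_walks_dfs_alt n_up n_down
instance (n_up : Int) (n_down : Int) (out : List String) : Decidable (Spec_generate_all_walks_dfs n_up n_down out) := by unfold Spec_generate_all_walks_dfs; infer_instance

-- ===== CLAIM (what is proved, stated in full; the proofs are below) =====
def Claim_equal_generate_all_walks_dfs : Prop := ∀ (n_up : Int) (n_down : Int), Dom_generate_all_walks_dfs n_up n_down → Spec_generate_all_walks_dfs n_up n_down (generate_all_walks_dfs n_up n_down)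

-- ===== LEMMAS AND PROOFS =====

-- the common value: pvG u d = every walk with u U's and d D's, in A's emission order (D-branch first)
def pvG : Nat → Nat → List String
  | 0, 0 => [""]
  | 0, d+1 => (pvG 0 d).map (fun s => "D" ++ s)
  | u+1, 0 => (pvG u 0).map (fun s => "U" ++ s)
  | u+1, d+1 => (pvG (u+1) d).map (fun s => "D" ++ s) ++ (pvG u (d+1)).map (fun s => "U" ++ s)

-- proof-side recursive description of A's DFS from one stack entry, with the same fuel discipline as pvLoopA
def pvDfsA (n_up : Int) (n_down : Int) (fuel : Nat) (path : String) (cur_up : Int) (cur_down : Int) : List String :=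
  match fuel with
  | 0 => []
  | fuel + 1 =>
    (if cur_up == n_up && cur_down == n_down then [path] else []) ++
    (if cur_down < n_down then pvDfsA n_up n_down fuel (path ++ "D") cur_up (cur_down + 1) else []) ++
    (if cur_up < n_up then pvDfsA n_up n_down fuel (path ++ "U") (cur_up + 1) cur_down else [])

-- weight of a stack entry; A's loop strictly shrinks the summed weight, so the supplied fuel never runs out
def pvWeightA (n_up : Int) (n_down : Int) : String × Int × Int → Nat
  | (_, u, d) => 3 ^ ((n_up - u).toNat + (n_down - d).toNat)

-- one pop of A's loop strictly shrinks the summed weight of the stack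
theorem pvWeightA_step (n_up n_down cur_up cur_down : Int) (path : String)
    (rest : List (String × Int × Int)) :
    (((if cur_down < n_down then
          ((path ++ "D"), cur_up, cur_down + 1) ::
            (if cur_up < n_up then ((path ++ "U"), cur_up + 1, cur_down) :: rest else rest)
        else
          (if cur_up < n_up then ((path ++ "U"), cur_up + 1, cur_down) :: rest else rest))).map
        (pvWeightA n_up n_down)).sum
      < pvWeightA n_up n_down (path, cur_up, cur_down) + (rest.map (pvWeightA n_up n_down)).sum := by
  simp only [pvWeightA]
  set r := (n_up - cur_up).toNat + (n_down - cur_down).toNat with hr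
  split_ifs with hd hu hu
  · simp only [List.map_cons, List.sum_cons, pvWeightA]
    have e1 : (n_up - cur_up).toNat + (n_down - (cur_down+1)).toNat = r - 1 := by omega
    have e2 : (n_up - (cur_up+1)).toNat + (n_down - cur_down).toNat = r - 1 := by omega
    have h3 : 3 ^ r = 3 ^ (r-1) * 3 := by rw [← Nat.pow_succ]; congr 1; omega
    have h1 : 1 ≤ 3 ^ (r-1) := Nat.one_le_pow _ _ (by omega)
    rw [e1, e2]; omega
  · simp only [List.map_cons, List.sum_cons, pvWeightA]
    have e1 : (n_up - cur_up).toNat + (n_down - (cur_down+1)).toNat = r - 1 := by omega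
    have h3 : 3 ^ r = 3 ^ (r-1) * 3 := by rw [← Nat.pow_succ]; congr 1; omega
    have h1 : 1 ≤ 3 ^ (r-1) := Nat.one_le_pow _ _ (by omega)
    rw [e1]; omega
  · simp only [List.map_cons, List.sum_cons, pvWeightA]
    have e2 : (n_up - (cur_up+1)).toNat + (n_down - cur_down).toNat = r - 1 := by omega
    have h3 : 3 ^ r = 3 ^ (r-1) * 3 := by rw [← Nat.pow_succ]; congr 1; omega
    have h1 : 1 ≤ 3 ^ (r-1) := Nat.one_le_pow _ _ (by omega)
    rw [e2]; omega
  · have h1 : 1 ≤ 3 ^ r := Nat.one_le_pow _ _ (by omega)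
    omega

-- pvDfsA ignores the fuel as long as it exceeds the remaining recursion depth
theorem pvDfsA_fuel_mono (n_up n_down : Int) :
    ∀ (F F' : Nat) (path : String) (cur_up cur_down : Int),
      (n_up - cur_up).toNat + (n_down - cur_down).toNat < F →
      (n_up - cur_up).toNat + (n_down - cur_down).toNat < F' →
      pvDfsA n_up n_down F path cur_up cur_down = pvDfsA n_up n_down F' path cur_up cur_down := by
  intro F
  induction F with
  | zero => intro F' path u d h _; omega
  | succ f ih =>
    intro F' path u d h h'
    match F' with
    | 0 => omega
    | f' + 1 =>
      simp only [pvDfsA]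
      congr 1
      · congr 1
        split_ifs with hd
        · exact ih f' _ _ _ (by omega) (by omega)
        · rfl
      · split_ifs with hu
        · exact ih f' _ _ _ (by omega) (by omega)
        · rfl

-- A's LIFO loop on any stack, with enough fuel, emits after ret the DFS walks of each stack entry in stack order
theorem pvLoopA_eq (n_up n_down : Int) :
    ∀ (F : Nat) (ret : List String) (stack : List (String × Int × Int)),
      (stack.map (pvWeightA n_up n_down)).sum ≤ F →
      pvLoopA n_up n_down F ret stack
        = ret ++ (stack.map (fun t =>
            pvDfsA n_up n_down ((n_up - t.2.1).toNat + (n_down - t.2.2).toNat + 1) t.1 t.2.1 t.2.2)).flatten := by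
  intro F
  induction F with
  | zero =>
    intro ret stack h
    match stack with
    | [] => simp [pvLoopA]
    | (path, u, d) :: rest =>
      exfalso
      have : 1 ≤ pvWeightA n_up n_down (path, u, d) := Nat.one_le_pow _ _ (by omega)
      simp only [List.map_cons, List.sum_cons] at h
      omega
  | succ f ih =>
    intro ret stack h
    match stack with
    | [] => simp [pvLoopA]
    | (path, cur_up, cur_down) :: rest =>
      have hstep := pvWeightA_step n_up n_down cur_up cur_down path rest
      simp only [List.map_cons, List.sum_cons] at h
      simp only [pvLoopA]
      rw [ih _ _ (by omega)]
      split_ifs with hd hu hc hu hc hc hc <;>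
        simp only [List.map_cons, List.flatten_cons] <;>
        (try rw [pvDfsA_fuel_mono n_up n_down
              ((n_up - cur_up).toNat + (n_down - (cur_down + 1)).toNat + 1)
              ((n_up - cur_up).toNat + (n_down - cur_down).toNat)
              (path ++ "D") cur_up (cur_down + 1) (by omega) (by omega)]) <;>
        (try rw [pvDfsA_fuel_mono n_up n_down
              ((n_up - (cur_up + 1)).toNat + (n_down - cur_down).toNat + 1)
              ((n_up - cur_up).toNat + (n_down - cur_down).toNat)
              (path ++ "U") (cur_up + 1) cur_down (by omega) (by omega)]) <;>
        (simp only [pvDfsA]) <;> split_ifs <;> simp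

-- once past either bound, A's DFS emits nothing
theorem pvDfsA_nil (n_up n_down : Int) :
    ∀ (F : Nat) (path : String) (u d : Int), (n_up < u ∨ n_down < d) →
      pvDfsA n_up n_down F path u d = [] := by
  intro F
  induction F with
  | zero => intro path u d h; rfl
  | succ f ih =>
    intro path u d h
    simp only [pvDfsA]
    have hc : (u == n_up && d == n_down) = false := by
      simp only [Bool.and_eq_false_iff, beq_eq_false_iff_ne]; omega
    rw [hc]
    split_ifs with hd hu hu <;> simp_all <;>
      first
      | exact ih _ _ _ (by omega)
      | exact ⟨ih _ _ _ (by omega), ih _ _ _ (by omega)⟩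

-- within the bounds, A's DFS from (path, u, d) is pvG on the remaining counts, prefixed by path
theorem pvDfsA_eq_g (n_up n_down : Int) :
    ∀ (F : Nat) (path : String) (u d : Int), u ≤ n_up → d ≤ n_down →
      (n_up - u).toNat + (n_down - d).toNat < F →
      pvDfsA n_up n_down F path u d
        = (pvG (n_up - u).toNat (n_down - d).toNat).map (fun s => path ++ s) := by
  intro F
  induction F with
  | zero => intro path u d hu hd hF; omega
  | succ f ih =>
    intro path u d hu hd hF
    simp only [pvDfsA]
    rcases e : (n_up - u).toNat with _ | a <;> rcases e2 : (n_down - d).toNat with _ | b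
    · have h1 : u = n_up := by omega
      have h2 : d = n_down := by omega
      subst h1; subst h2
      simp [pvG, String.append_empty]
    · have hc : (u == n_up && d == n_down) = false := by
        simp only [Bool.and_eq_false_iff, beq_eq_false_iff_ne]; omega
      have e3 : (n_down - (d + 1)).toNat = b := by omega
      rw [hc, if_pos (show d < n_down by omega), if_neg (show ¬ u < n_up by omega),
        ih _ _ _ (by omega) (by omega) (by omega), e, e3]
      simp [pvG, List.map_map, Function.comp_def, String.append_assoc]
    · have hc : (u == n_up && d == n_down) = false := by
        simp only [Bool.and_eq_false_iff, beq_eq_false_iff_ne]; omega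
      have e3 : (n_up - (u + 1)).toNat = a := by omega
      rw [hc, if_neg (show ¬ d < n_down by omega), if_pos (show u < n_up by omega),
        ih _ _ _ (by omega) (by omega) (by omega), e3, e2]
      simp [pvG, List.map_map, Function.comp_def, String.append_assoc]
    · have hc : (u == n_up && d == n_down) = false := by
        simp only [Bool.and_eq_false_iff, beq_eq_false_iff_ne]; omega
      have e3 : (n_down - (d + 1)).toNat = b := by omega
      have e4 : (n_up - (u + 1)).toNat = a := by omega
      rw [hc, if_pos (show d < n_down by omega), if_pos (show u < n_up by omega),
        ih _ _ _ (by omega) (by omega) (by omega),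
        ih _ _ _ (by omega) (by omega) (by omega), e, e2, e3, e4]
      simp [pvG, List.map_map, Function.comp_def, String.append_assoc]

-- B's inner loop builds row u from row u-1
theorem pvRowB_eq (n_down : Int) (hnd : 0 ≤ n_down) (u : Nat) (prev : List (List String))
    (hprev : u ≠ 0 → prev = (List.range (n_down.toNat + 1)).map (fun j => pvG (u - 1) j)) :
    pvRowB n_down (u : Int) prev = (List.range (n_down.toNat + 1)).map (fun j => pvG u j) := by
  have aux : ∀ k : Nat, k ≤ n_down.toNat + 1 →
      (PySem.List.pyRange 0 (k : Int) 1).foldl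
        (fun row d =>
          row ++ [if (u : Int) == 0 && d == 0 then [""]
                  else (if d > 0 then (PySem.List.pyGetD row (-1) []).map (fun s => "D" ++ s) else []) ++
                       (if (u : Int) > 0 then (PySem.List.pyGetD prev d []).map (fun s => "U" ++ s) else [])]) []
        = (List.range k).map (fun j => pvG u j) := by
    intro k
    induction k with
    | zero => intro _; simp [PySem.List.pyRange]
    | succ k ihk =>
      intro hk
      have hcast : ((k + 1 : Nat) : Int) = (k : Int) + 1 := by push_cast; ring
      rw [hcast, PySem.List.pyRange_one_succ_right (by omega), List.foldl_append,
        ihk (by omega)]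
      simp only [List.foldl_cons, List.foldl_nil]
      rw [List.range_succ, List.map_append, List.map_cons, List.map_nil]
      congr 1
      -- the new entry equals pvG u k
      rcases u with _ | i <;> rcases k with _ | j
      · simp [pvG]
      · have hDlast : PySem.List.pyGetD ((List.range (j + 1)).map (fun j => pvG 0 j)) (-1) []
            = pvG 0 j := by
          have hne : ((List.range (j + 1)).map (fun j => pvG 0 j)) ≠ [] := by simp
          rw [PySem.List.pyGetD_neg_one _ _ hne]
          simp [List.getLast_eq_getElem]
        simp [hDlast, pvG]
        exact fun h => absurd h (by omega)
      · have hprev' := hprev (by omega)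
        simp only [Nat.add_sub_cancel] at hprev'
        have hU : PySem.List.pyGetD prev ((0 : Nat) : Int) [] = pvG i 0 := by
          rw [hprev', PySem.List.pyGetD_natCast]
          rw [PySem.List.getD_map_range _ _ _ _ (by omega)]
        simp only [Nat.cast_zero] at hU
        simp [pvG, hU]
        exact fun h => absurd h (by omega)
      · have hprev' := hprev (by omega)
        simp only [Nat.add_sub_cancel] at hprev'
        have hDlast : PySem.List.pyGetD ((List.range (j + 1)).map (fun j => pvG (i + 1) j)) (-1) []
            = pvG (i + 1) j := by
          have hne : ((List.range (j + 1)).map (fun j => pvG (i + 1) j)) ≠ [] := by simp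
          rw [PySem.List.pyGetD_neg_one _ _ hne]
          simp [List.getLast_eq_getElem]
        have hU : PySem.List.pyGetD prev ((j + 1 : Nat) : Int) [] = pvG i (j + 1) := by
          rw [hprev', PySem.List.pyGetD_natCast]
          rw [PySem.List.getD_map_range _ _ _ _ (by omega)]
        push_cast at hU
        simp [pvG, hDlast, hU]
        exact fun h => absurd h (by omega)
  unfold pvRowB
  have hend : (n_down + 1 : Int) = ((n_down.toNat + 1 : Nat) : Int) := by omega
  rw [hend, aux (n_down.toNat + 1) (by omega)]

-- B's outer loop leaves the row for up-count m-1
theorem pvOuterB (n_down : Int) (hnd : 0 ≤ n_down) :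
    ∀ (m : Nat), 1 ≤ m →
      (PySem.List.pyRange 0 (m : Int) 1).foldl (fun prev u => pvRowB n_down u prev) []
        = (List.range (n_down.toNat + 1)).map (fun j => pvG (m - 1) j) := by
  intro m
  induction m with
  | zero => intro hm; omega
  | succ k ihk =>
    intro _
    rcases Nat.eq_zero_or_pos k with hk0 | hkpos
    · subst hk0
      have h1 : ((0 + 1 : Nat) : Int) = 0 + 1 := by norm_num
      rw [h1, PySem.List.pyRange_one_singleton, List.foldl_cons, List.foldl_nil]
      have h0 : (0 : Int) = ((0 : Nat) : Int) := rfl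
      rw [h0, pvRowB_eq n_down hnd 0 [] (by omega)]
    · have hcast : ((k + 1 : Nat) : Int) = (k : Int) + 1 := by push_cast; ring
      rw [hcast, PySem.List.pyRange_one_succ_right (by omega), List.foldl_append,
        ihk (by omega), List.foldl_cons, List.foldl_nil,
        pvRowB_eq n_down hnd k _ (fun _ => rfl)]
      simp

-- ===== VERDICT (by name: the statement is the Claim_ definition above) =====
theorem generate_all_walks_dfs_spec : Claim_equal_generate_all_walks_dfs := by
  intro n_up n_down _
  unfold Spec_generate_all_walks_dfs generate_all_walks_dfs generate_all_walks_dfs_alt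
  rw [pvLoopA_eq n_up n_down _ _ _ (by simp [pvWeightA])]
  by_cases hneg : n_up < 0 ∨ n_down < 0
  · have hb : (n_up < 0 || n_down < 0) = true := by simp; omega
    rw [if_pos hb]
    simp [pvDfsA_nil n_up n_down _ "" 0 0 (by omega)]
  · rw [not_or, not_lt, not_lt] at hneg
    have hb : (n_up < 0 || n_down < 0) = false := by simp; omega
    rw [if_neg (by simp [hb])]
    have hup : (n_up + 1) = ((n_up.toNat + 1 : Nat) : Int) := by omega
    rw [hup, pvOuterB n_down (by omega) (n_up.toNat + 1) (by omega)]
    have hlast : PySem.List.pyGetD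
        ((List.range (n_down.toNat + 1)).map (fun j => pvG (n_up.toNat + 1 - 1) j)) (-1) []
        = pvG n_up.toNat n_down.toNat := by
      have hne : ((List.range (n_down.toNat + 1)).map (fun j => pvG (n_up.toNat + 1 - 1) j)) ≠ [] := by simp
      rw [PySem.List.pyGetD_neg_one _ _ hne]
      simp [List.getLast_eq_getElem]
    rw [hlast]
    simp only [List.map_cons, List.map_nil, List.flatten_cons, List.flatten_nil,
      List.append_nil, List.nil_append]
    rw [pvDfsA_eq_g n_up n_down _ "" 0 0 (by omega) (by omega) (by omega)]
    simp
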